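-- pv_equiv track=rewrite | github.com/chrishadley1983/discord-messenger | instagram/scripts/05b_analyse_direct.py | detect_all_keywords
-- ===== SOURCE A (Python) =====
-- from collections import defaultdict
--
-- def detect_all_keywords(text: str, keyword_dict: dict[str, list[str]]) -> list[tuple[str, int]]:
--     """Find all matching categories with scores, sorted by score descending."""
--     text_lower = text.lower()
--     scores: dict[str, int] = defaultdict(int)
--     for category, keywords in keyword_dict.items():
--         for kw in keywords:
--             if kw in text_lower:
--                 scores[category] += 1
--     return sorted(scores.items(), key=lambda x: -x[1])
-- ===== SOURCE B (Python) =====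
-- def detect_all_keywords(text: str, keyword_dict: dict[str, list[str]]) -> list[tuple[str, int]]:
--     """Count matching keywords per category; order buckets by score via a
--     counting sort built back-to-front (no dict of scores, no comparison sort)."""
--     text_lower = text.lower()
--     hits = []
--     for category, keywords in keyword_dict.items():
--         n = sum(1 for kw in keywords if kw in text_lower)
--         if n > 0:
--             hits.append((category, n))
--     top = 0
--     for _, n in hits:
--         top = max(top, n)
--     result = []
--     for s in range(1, top + 1):
--         result = [(c, n) for c, n in hits if n == s] + result
--     return result
-- ===== Notes on version B (the rewrite author's own statement) =====
-- stated objective: alternative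
-- what changed: B replaces A's defaultdict-increment plus comparison sort (sorted with key -score) by a single per-category count pass that keeps only positive scores, followed by a counting/bucket sort: it prepends the bucket of each score s = 1..max in front of the result, so no score dict and no sort call are needed.
import Mathlib
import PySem

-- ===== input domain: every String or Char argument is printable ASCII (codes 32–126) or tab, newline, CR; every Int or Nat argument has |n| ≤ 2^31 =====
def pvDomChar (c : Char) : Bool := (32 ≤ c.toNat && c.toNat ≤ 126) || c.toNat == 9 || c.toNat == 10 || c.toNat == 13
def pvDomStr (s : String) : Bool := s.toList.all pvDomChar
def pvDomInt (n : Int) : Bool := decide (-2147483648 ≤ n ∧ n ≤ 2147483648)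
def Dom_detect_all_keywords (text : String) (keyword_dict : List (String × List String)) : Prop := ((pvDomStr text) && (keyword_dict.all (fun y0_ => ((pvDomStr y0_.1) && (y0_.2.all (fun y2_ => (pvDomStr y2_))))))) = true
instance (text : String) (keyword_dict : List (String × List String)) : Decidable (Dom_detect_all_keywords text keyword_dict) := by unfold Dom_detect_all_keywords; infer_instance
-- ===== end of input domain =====

-- B replaces A's defaultdict-increment + comparison sort by one per-category counting
-- pass keeping only positive scores, then a counting/bucket sort that prepends the
-- bucket of each score s = 1..max (alternative decomposition; same dominant cost).

-- ===== PORT A =====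
def detect_all_keywords (text : String) (keyword_dict : List (String × List String)) : List (String × Int) :=
  let text_lower := PySem.Str.lower text
  let scores : PySem.Dict String Int :=
    keyword_dict.foldl (fun sc p =>
      p.2.foldl (fun sc kw =>
        if PySem.Str.isIn kw text_lower then sc.modify p.1 0 (· + 1) else sc) sc)
      PySem.Dict.empty
  PySem.List.sorted scores.items (fun x => -x.2)

-- ===== PORT B =====
def detect_all_keywords_alt (text : String) (keyword_dict : List (String × List String)) : List (String × Int) :=
  let text_lower := PySem.Str.lower text
  let hits : List (String × Int) := keyword_dict.foldl (fun acc p =>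
    let n : Int := (p.2.countP (fun kw => PySem.Str.isIn kw text_lower) : Int)
    if 0 < n then acc ++ [(p.1, n)] else acc) []
  let top : Int := hits.foldl (fun a q => max a q.2) 0
  (PySem.List.pyRange 1 (top + 1)).foldl
    (fun res s => hits.filter (fun q => q.2 == s) ++ res) []

-- ===== PRECONDITION & SPEC =====
-- Pre_ excludes association lists with duplicate category keys: they do not represent
-- any Python dict (A's parameter is a dict, whose keys are necessarily distinct).
def Pre_detect_all_keywords (text : String) (keyword_dict : List (String × List String)) : Prop :=
  (keyword_dict.map Prod.fst).Nodup
instance (text : String) (keyword_dict : List (String × List String)) : Decidable (Pre_detect_all_keywords text keyword_dict) := by unfold Pre_detect_all_keywords; infer_instance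
def pvWitness_detect_all_keywords : String × (List (String × List String)) :=
  ("Buy now and win big", [("sales", ["buy", "sell"]), ("spam", ["win", "free", "now"]), ("tech", ["python"])])

def Spec_detect_all_keywords (text : String) (keyword_dict : List (String × List String)) (out : List (String × Int)) : Prop := out = detect_all_keywords_alt text keyword_dict
instance (text : String) (keyword_dict : List (String × List String)) (out : List (String × Int)) : Decidable (Spec_detect_all_keywords text keyword_dict out) := by unfold Spec_detect_all_keywords; infer_instance

-- ===== CLAIM (what is proved, stated in full; the proofs are below) =====
def Claim_equal_detect_all_keywords : Prop := ∀ (text : String) (keyword_dict : List (String × List String)), Dom_detect_all_keywords text keyword_dict → Pre_detect_all_keywords text keyword_dict → Spec_detect_all_keywords text keyword_dict (detect_all_keywords text keyword_dict)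

-- ===== LEMMAS AND PROOFS =====

def pvBuckets (l : List (String × Int)) (m : Nat) : List (String × Int) :=
  (PySem.List.pyRange 1 ((m : Int) + 1)).foldl
    (fun res s => l.filter (fun q => q.2 == s) ++ res) []

lemma pvBuckets_zero (l : List (String × Int)) : pvBuckets l 0 = [] := by
  simp [pvBuckets]

lemma pvBuckets_succ (l : List (String × Int)) (m : Nat) :
    pvBuckets l (m + 1) = l.filter (fun q => q.2 == ((m : Int) + 1)) ++ pvBuckets l m := by
  unfold pvBuckets
  have h : ((m + 1 : Nat) : Int) + 1 = ((m : Int) + 1) + 1 := by push_cast; ring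
  rw [h, PySem.List.pyRange_one_succ_right (by omega), List.foldl_append]
  simp

lemma insertBy_cons_of_before {α : Type} (before : α → α → Bool) (x y : α) (ys : List α)
    (h : before x y = true) : PySem.List.insertBy before x (y :: ys) = x :: y :: ys := by
  simp [PySem.List.insertBy, h]

lemma insertBy_append_skip {α : Type} (before : α → α → Bool) (x : α) (as bs : List α)
    (h : ∀ a ∈ as, before x a = false) :
    PySem.List.insertBy before x (as ++ bs) = as ++ PySem.List.insertBy before x bs := by
  induction as with
  | nil => simp
  | cons a t ih =>
    have ha := h a (by simp)
    simp [PySem.List.insertBy, ha, ih (fun a ha' => h a (by simp [ha']))]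

lemma pvBuckets_nil (m : Nat) : pvBuckets [] m = [] := by
  induction m with
  | zero => exact pvBuckets_zero []
  | succ m ih => simp [pvBuckets_succ, ih]

lemma mem_pvBuckets {l : List (String × Int)} {m : Nat} {q : String × Int}
    (h : q ∈ pvBuckets l m) : q ∈ l ∧ q.2 ≤ (m : Int) := by
  induction m with
  | zero => simp [pvBuckets_zero] at h
  | succ m ih =>
    rw [pvBuckets_succ, List.mem_append] at h
    rcases h with h | h
    · rw [List.mem_filter] at h
      refine ⟨h.1, ?_⟩
      have := h.2
      simp at this
      push_cast
      omega
    · have := ih h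
      refine ⟨this.1, ?_⟩
      push_cast
      omega

lemma pvBuckets_append_of_gt (l : List (String × Int)) (x : String × Int) (m : Nat)
    (hx : (m : Int) < x.2) : pvBuckets (l ++ [x]) m = pvBuckets l m := by
  induction m with
  | zero => rw [pvBuckets_zero, pvBuckets_zero]
  | succ m ih =>
    rw [pvBuckets_succ, pvBuckets_succ, List.filter_append]
    have hne : (x.2 == ((m : Int) + 1)) = false := by
      simp; push_cast at hx ⊢; omega
    have h2 : ((m:Int)) < x.2 := by push_cast at hx ⊢; omega
    simp [hne, ih h2]

lemma insertBy_pvBuckets (m : Nat) (l : List (String × Int)) (x : String × Int)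
    (hx1 : 1 ≤ x.2) (hx2 : x.2 ≤ (m : Int)) :
    PySem.List.insertBy (fun a b => decide (-a.2 < -b.2)) x (pvBuckets l m)
      = pvBuckets (l ++ [x]) m := by
  induction m with
  | zero => exact absurd (le_trans hx1 hx2) (by norm_num)
  | succ m ih =>
    rw [pvBuckets_succ, pvBuckets_succ (l ++ [x]), List.filter_append]
    by_cases hxm : x.2 = (m : Int) + 1
    · -- x belongs to the top bucket: goes right after the existing bucket
      rw [insertBy_append_skip _ _ _ _ (by
        intro a ha
        rw [List.mem_filter] at ha
        have : a.2 = (m : Int) + 1 := by simpa using ha.2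
        simp [this, hxm])]
      have hxf : List.filter (fun q => q.2 == ((m:Int)+1)) [x] = [x] := by simp [hxm]
      rw [hxf, pvBuckets_append_of_gt l x m (by omega), List.append_assoc]
      congr 1
      -- insertBy x (pvBuckets l m) = [x] ++ pvBuckets l m
      cases hB : pvBuckets l m with
      | nil => simp [PySem.List.insertBy]
      | cons y ys =>
        have hy : y ∈ pvBuckets l m := by rw [hB]; simp
        have := (mem_pvBuckets hy).2
        rw [insertBy_cons_of_before _ _ _ _ (by simp; omega)]
        simp
    · -- x goes into a lower bucket
      have hxle : x.2 ≤ (m : Int) := by push_cast at hx2 ⊢; omega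
      rw [insertBy_append_skip _ _ _ _ (by
        intro a ha
        rw [List.mem_filter] at ha
        have : a.2 = (m : Int) + 1 := by simpa using ha.2
        simp [this]; omega)]
      have hxf : List.filter (fun q => q.2 == ((m:Int)+1)) [x] = [] := by simp [hxm]
      rw [hxf, List.append_nil, ih hxle]

lemma sorted_eq_pvBuckets (m : Nat) (l : List (String × Int))
    (hl : ∀ q ∈ l, 1 ≤ q.2 ∧ q.2 ≤ (m : Int)) :
    PySem.List.sorted l (fun x => -x.2) = pvBuckets l m := by
  induction l using List.reverseRecOn with
  | nil => simp [PySem.List.sorted_eq_foldl_insertBy, pvBuckets_nil]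
  | append_singleton l x ih =>
    rw [PySem.List.sorted_eq_foldl_insertBy, List.foldl_append]
    simp only [List.foldl_cons, List.foldl_nil]
    rw [← PySem.List.sorted_eq_foldl_insertBy l (fun x => -x.2)]
    rw [ih (fun q hq => hl q (by simp [hq]))]
    have hx := hl x (by simp)
    exact insertBy_pvBuckets m l x hx.1 hx.2

lemma dict_contains_eq_any {κ ν : Type} [BEq κ] (d : PySem.Dict κ ν) (c : κ) :
    d.contains c = d.items.any (fun p => p.1 == c) := rfl

lemma dict_modify_fresh (d : PySem.Dict String Int) (c : String)
    (hc : d.contains c = false) :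
    (d.modify c 0 (· + 1)).items = d.items ++ [(c, 1)] := by
  have hg : d.get? c = none := by
    rw [PySem.Dict.get?]
    cases hf : d.items.find? (fun p => p.1 == c) with
    | none => rfl
    | some p =>
      have := List.find?_some hf
      have hm := List.mem_of_find?_eq_some hf
      rw [dict_contains_eq_any] at hc
      rw [List.any_eq_false] at hc
      exact absurd this (by simpa using hc p hm)
  rw [PySem.Dict.modify, PySem.Dict.getD, hg]
  rw [PySem.Dict.insert, hc]
  rfl

lemma dict_modify_fold_last (c : String) (L : List String) (base : List (String × Int)) (v : Int)
    (hc : (base.any (fun p => p.1 == c)) = false) :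
    ((L.foldl (fun sc (_ : String) => sc.modify c 0 (· + 1)) (PySem.Dict.mk (base ++ [(c, v)]))).items)
      = base ++ [(c, v + (L.length : Int))] := by
  induction L generalizing v with
  | nil => simp
  | cons a L ih =>
    rw [List.foldl_cons]
    have hstep : (PySem.Dict.mk (base ++ [(c, v)])).modify c 0 (· + 1)
        = PySem.Dict.mk (base ++ [(c, v + 1)]) := by
      have hcon : (PySem.Dict.mk (base ++ [(c, v)])).contains c = true := by
        rw [dict_contains_eq_any]; simp
      have hfind : (base ++ [(c, v)]).find? (fun p => p.1 == c) = some (c, v) := by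
        rw [List.find?_append]
        have : base.find? (fun p => p.1 == c) = none := List.find?_eq_none.mpr (by
          intro p hp
          have := (List.any_eq_false.mp hc) p hp
          simpa using this)
        simp [this]
      have hg : (PySem.Dict.mk (base ++ [(c, v)])).getD c 0 = v := by
        rw [PySem.Dict.getD, PySem.Dict.get?]
        show (Option.map _ ((base ++ [(c,v)]).find? _)).getD 0 = v
        rw [hfind]; rfl
      rw [PySem.Dict.modify, hg, PySem.Dict.insert, hcon]
      simp only [if_true]
      congr 1
      show List.map _ (base ++ [(c,v)]) = _
      rw [List.map_append]
      congr 1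
      · have hb : ∀ p ∈ base, (if (p.1 == c) = true then (c, v + 1) else p) = p := by
          intro p hp
          simp [(List.any_eq_false.mp hc) p hp]
        rw [List.map_congr_left hb]; exact List.map_id _
      · simp
    rw [hstep, ih (v + 1)]
    congr 3
    simp only [List.length_cons]
    push_cast
    omega


lemma dict_modify_fold_fresh (c : String) (L : List String) (d : PySem.Dict String Int)
    (hc : d.contains c = false) :
    (L.foldl (fun sc (_ : String) => sc.modify c 0 (· + 1)) d).items
      = if L.isEmpty then d.items else d.items ++ [(c, (L.length : Int))] := by
  cases L with
  | nil => simp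
  | cons a L =>
    rw [List.foldl_cons]
    have h1 : d.modify c 0 (· + 1) = PySem.Dict.mk (d.items ++ [(c, 1)]) := by
      apply PySem.Dict.ext
      rw [dict_modify_fresh d c hc]
    rw [h1, dict_modify_fold_last c L d.items 1 (by rw [dict_contains_eq_any] at hc; exact hc)]
    simp only [List.isEmpty_cons, Bool.false_eq_true, if_false]
    congr 3
    simp only [List.length_cons]
    push_cast
    omega

lemma dict_outer_items (pred : String → Bool) (kd : List (String × List String))
    (d : PySem.Dict String Int)
    (hnd : (kd.map Prod.fst).Nodup)
    (hdisj : ∀ p ∈ kd, d.contains p.1 = false) :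
    (kd.foldl (fun sc p =>
        p.2.foldl (fun sc kw => if pred kw then sc.modify p.1 0 (· + 1) else sc) sc) d).items
      = d.items ++ (kd.filter (fun p => p.2.any pred)).map
          (fun p => (p.1, (p.2.countP pred : Int))) := by
  induction kd generalizing d with
  | nil => simp
  | cons p kd ih =>
    rw [List.foldl_cons]
    have hinner : (p.2.foldl (fun sc kw => if pred kw then sc.modify p.1 0 (· + 1) else sc) d)
        = (p.2.filter pred).foldl (fun sc (_ : String) => sc.modify p.1 0 (· + 1)) d := by
      rw [PySem.List.foldl_if_eq_foldl_filter]
    have hc : d.contains p.1 = false := hdisj p (by simp)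
    have hitems := dict_modify_fold_fresh p.1 (p.2.filter pred) d hc
    rw [hinner] at *
    set d' := (p.2.filter pred).foldl (fun sc (_ : String) => sc.modify p.1 0 (· + 1)) d with hd'
    have hnd' : (kd.map Prod.fst).Nodup := (List.nodup_cons.mp hnd).2
    have hpne : ∀ q ∈ kd, ¬ (q.1 = p.1) := by
      intro q hq h
      exact (List.nodup_cons.mp hnd).1 (by rw [← h]; exact List.mem_map_of_mem hq)
    by_cases hany : p.2.any pred = true
    · have hne : (p.2.filter pred).isEmpty = false := by
        simp only [List.isEmpty_eq_false_iff_exists_mem]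
        obtain ⟨a, ha, hpa⟩ := List.any_eq_true.mp hany
        exact ⟨a, List.mem_filter.mpr ⟨ha, hpa⟩⟩
      rw [hne] at hitems
      simp only [Bool.false_eq_true, if_false] at hitems
      have hdisj' : ∀ q ∈ kd, d'.contains q.1 = false := by
        intro q hq
        rw [dict_contains_eq_any, hitems, List.any_append]
        have h1 : d.items.any (fun r => r.1 == q.1) = false := by
          rw [← dict_contains_eq_any]; exact hdisj q (by simp [hq])
        have h2 : ([(p.1, ((p.2.filter pred).length : Int))].any (fun r => r.1 == q.1)) = false := by
          simp
          intro h
          exact absurd h.symm (hpne q hq)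
        rw [h1, h2]; rfl
      rw [ih d' hnd' hdisj', hitems]
      simp only [List.filter_cons, hany, if_true, List.map_cons]
      rw [List.append_assoc, List.countP_eq_length_filter]
      simp
    · have hLnil : (p.2.filter pred) = [] := by
        rw [List.filter_eq_nil_iff]
        intro a ha
        exact fun hpa => hany (List.any_eq_true.mpr ⟨a, ha, hpa⟩)
      have hd'' : d' = d := by rw [hd', hLnil]; rfl
      rw [hd'']
      rw [ih d hnd' (fun q hq => hdisj q (by simp [hq]))]
      simp only [List.filter_cons, Bool.not_eq_true] at *
      simp [hany]

lemma any_eq_countP_pos (pr : String → Bool) (l : List String) :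
    (0 < ((l.countP pr : Nat) : Int)) ↔ l.any pr = true := by
  rw [List.any_eq_true]
  constructor
  · intro h
    have : 0 < l.countP pr := by exact_mod_cast h
    obtain ⟨a, ha, hpa⟩ := List.countP_pos_iff.mp this
    exact ⟨a, ha, hpa⟩
  · intro ⟨a, ha, hpa⟩
    have : 0 < l.countP pr := List.countP_pos_iff.mpr ⟨a, ha, hpa⟩
    exact_mod_cast this

-- ===== VERDICT (by name: the statement is the Claim_ definition above) =====
theorem detect_all_keywords_spec : Claim_equal_detect_all_keywords := by
  intro text kd _ hpre
  unfold Spec_detect_all_keywords detect_all_keywords detect_all_keywords_alt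
  simp only []
  set tl := PySem.Str.lower text with htl
  set pred : String → Bool := fun kw => PySem.Str.isIn kw tl with hpred
  set H : List (String × Int) := (kd.filter (fun p => p.2.any pred)).map
      (fun p => (p.1, (p.2.countP pred : Int))) with hH
  -- A's side: the score dict's items are exactly H
  have hempty : ∀ p ∈ kd, (PySem.Dict.empty : PySem.Dict String Int).contains p.1 = false := by
    intro p _; rfl
  have hA : (kd.foldl (fun sc p =>
        p.2.foldl (fun sc kw => if pred kw then sc.modify p.1 0 (· + 1) else sc) sc)
        (PySem.Dict.empty : PySem.Dict String Int)).items = H := by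
    rw [dict_outer_items pred kd PySem.Dict.empty hpre hempty]
    rfl
  rw [hA]
  -- B's side: the hits loop builds exactly H
  have hB : (kd.foldl (fun acc p =>
        if 0 < ((p.2.countP pred : Nat) : Int) then acc ++ [(p.1, ((p.2.countP pred : Nat) : Int))] else acc)
        ([] : List (String × Int))) = H := by
    rw [PySem.List.foldl_append_ite
      (p := fun p : String × List String => 0 < ((p.2.countP pred : Nat) : Int))
      (f := fun p : String × List String => (p.1, ((p.2.countP pred : Nat) : Int)))]
    rw [List.nil_append, hH]
    congr 1
    apply List.filter_congr
    intro p _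
    cases h : p.2.any pred
    · apply decide_eq_false
      intro hc
      have := (any_eq_countP_pos pred p.2).mp hc
      rw [h] at this
      cases this
    · exact decide_eq_true ((any_eq_countP_pos pred p.2).mpr h)
  rw [hB]
  -- bounds for the scores in H
  have hmax := PySem.List.le_foldl_max_int H (fun q => q.2) 0
  set top : Int := H.foldl (fun a q => max a q.2) 0 with htop
  have h0 : 0 ≤ top := hmax.1
  have hbound : ∀ q ∈ H, 1 ≤ q.2 ∧ q.2 ≤ (top.toNat : Int) := by
    intro q hq
    constructor
    · rw [hH] at hq
      obtain ⟨p, hp, hpq⟩ := List.mem_map.mp hq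
      have hfil := (List.mem_filter.mp hp).2
      have : 0 < ((p.2.countP pred : Nat) : Int) := (any_eq_countP_pos pred p.2).mpr hfil
      rw [← hpq]
      simpa using this
    · have := hmax.2 q hq
      rw [Int.toNat_of_nonneg h0]
      exact this
  have hrange : top + 1 = ((top.toNat : Int)) + 1 := by rw [Int.toNat_of_nonneg h0]
  rw [hrange]
  exact (sorted_eq_pvBuckets top.toNat H hbound).trans rfl
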